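-- pv_equiv track=rewrite | github.com/HungryPoitrasths/mybenchmark | scripts/run_pipeline.py | _count_labels_for_object_ids
-- ===== SOURCE A (Python) =====
-- from collections import Counter, defaultdict
--
-- def _count_labels_for_object_ids(
--     object_ids: list[int],
--     objects_by_id: dict[int, dict],
-- ) -> dict[str, int]:
--     counter: Counter[str] = Counter()
--     for obj_id in object_ids:
--         obj = objects_by_id.get(int(obj_id))
--         if obj is None:
--             continue
--         label = str(obj.get("label", "")).strip()
--         if not label:
--             continue
--         counter[label] += 1
--     return dict(sorted((str(label), int(count)) for label, count in counter.items()))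
-- ===== SOURCE B (Python) =====
-- from itertools import groupby
--
--
-- def _count_labels_for_object_ids(
--     object_ids: list[int],
--     objects_by_id: dict[int, dict],
-- ) -> dict[str, int]:
--     labels = sorted(
--         lab
--         for lab in (
--             str(objects_by_id.get(int(obj_id), {}).get("label", "")).strip()
--             for obj_id in object_ids
--         )
--         if lab
--     )
--     return {label: len(list(group)) for label, group in groupby(labels)}
-- ===== Notes on version B (the rewrite author's own statement) =====
-- stated objective: alternative
-- what changed: Replaces the Counter-hash-then-sort-items strategy by extracting the flat list of valid labels, sorting it, and producing each (label, run length) pair with itertools.groupby over the sorted list.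
import Mathlib
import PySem

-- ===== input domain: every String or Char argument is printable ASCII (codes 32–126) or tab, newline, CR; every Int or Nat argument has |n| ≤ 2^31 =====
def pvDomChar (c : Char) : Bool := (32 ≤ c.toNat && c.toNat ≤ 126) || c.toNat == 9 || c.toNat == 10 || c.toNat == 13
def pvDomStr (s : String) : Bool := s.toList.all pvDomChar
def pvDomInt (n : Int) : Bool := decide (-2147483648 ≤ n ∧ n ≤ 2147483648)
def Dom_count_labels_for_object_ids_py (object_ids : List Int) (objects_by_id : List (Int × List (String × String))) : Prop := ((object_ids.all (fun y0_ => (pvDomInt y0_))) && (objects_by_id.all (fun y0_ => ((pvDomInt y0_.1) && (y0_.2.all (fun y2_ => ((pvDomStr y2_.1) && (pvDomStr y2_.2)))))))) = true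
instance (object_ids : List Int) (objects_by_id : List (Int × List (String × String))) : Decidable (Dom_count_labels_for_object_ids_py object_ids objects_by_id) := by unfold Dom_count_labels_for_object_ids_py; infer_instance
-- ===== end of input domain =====

-- B replaces A's Counter-hash-then-sort-items strategy by collecting the valid labels,
-- sorting them, and emitting (label, run length) pairs groupby-style over the sorted list
-- (objective: alternative; same return value, proved below).

-- ===== PORT A =====
def count_labels_for_object_ids_py (object_ids : List Int) (objects_by_id : List (Int × List (String × String))) : List (String × Int) :=
  let counter : PySem.Dict String Int :=
    object_ids.foldl (fun counter obj_id =>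
      match (PySem.Dict.mk objects_by_id).get? obj_id with
      | none => counter
      | some obj =>
        let label := PySem.Str.strip ((PySem.Dict.mk obj).getD "label" "")
        if label = "" then counter
        else counter.modify label 0 (fun c => c + 1)) PySem.Dict.empty
  PySem.List.sorted2 counter.items (fun p => p.1) (fun p => p.2)

-- ===== PORT B =====
-- the inner generator of Source B: the normalized label extracted for one object id
def pvLabel (objects_by_id : List (Int × List (String × String))) (obj_id : Int) : String :=
  PySem.Str.strip ((PySem.Dict.mk ((PySem.Dict.mk objects_by_id).getD obj_id [])).getD "label" "")

-- the filtered label stream of Source B (before sorting)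
def pvLabels (object_ids : List Int) (objects_by_id : List (Int × List (String × String))) : List String :=
  (object_ids.map (pvLabel objects_by_id)).filter (fun lab => lab != "")

-- itertools.groupby over a list + len(list(group)) per key, as Source B consumes it
def pvGroupRuns : List String → List (String × Int)
  | [] => []
  | x :: xs =>
    (x, (1 : Int) + (xs.takeWhile (fun y => y == x)).length) :: pvGroupRuns (xs.dropWhile (fun y => y == x))
  termination_by l => l.length
  decreasing_by
    simp only [List.length_cons]
    exact Nat.lt_succ_of_le (List.length_dropWhile_le _ _)

def count_labels_for_object_ids_py_alt (object_ids : List Int) (objects_by_id : List (Int × List (String × String))) : List (String × Int) :=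
  pvGroupRuns (PySem.List.sorted (pvLabels object_ids objects_by_id) (fun s => s))

-- ===== PRECONDITION & SPEC =====
def Spec_count_labels_for_object_ids_py (object_ids : List Int) (objects_by_id : List (Int × List (String × String))) (out : List (String × Int)) : Prop := out = count_labels_for_object_ids_py_alt object_ids objects_by_id
instance (object_ids : List Int) (objects_by_id : List (Int × List (String × String))) (out : List (String × Int)) : Decidable (Spec_count_labels_for_object_ids_py object_ids objects_by_id out) := by unfold Spec_count_labels_for_object_ids_py; infer_instance

-- ===== CLAIM (what is proved, stated in full; the proofs are below) =====
def Claim_equal_count_labels_for_object_ids_py : Prop := ∀ (object_ids : List Int) (objects_by_id : List (Int × List (String × String))), Dom_count_labels_for_object_ids_py object_ids objects_by_id → Spec_count_labels_for_object_ids_py object_ids objects_by_id (count_labels_for_object_ids_py object_ids objects_by_id)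

-- ===== LEMMAS AND PROOFS =====

theorem pvLabels_cons (i : Int) (t : List Int) (objects_by_id : List (Int × List (String × String))) :
    pvLabels (i :: t) objects_by_id
      = if pvLabel objects_by_id i = "" then pvLabels t objects_by_id
        else pvLabel objects_by_id i :: pvLabels t objects_by_id := by
  simp only [pvLabels, List.map_cons, List.filter_cons, bne_iff_ne, ne_eq]
  by_cases h : pvLabel objects_by_id i = "" <;> simp [h]

-- A's counting loop builds exactly Counter(pvLabels …)
theorem pvAfold (objects_by_id : List (Int × List (String × String))) :
    ∀ (l : List Int) (d : PySem.Dict String Int),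
      l.foldl (fun counter obj_id =>
        match (PySem.Dict.mk objects_by_id).get? obj_id with
        | none => counter
        | some obj =>
          let label := PySem.Str.strip ((PySem.Dict.mk obj).getD "label" "")
          if label = "" then counter
          else counter.modify label 0 (fun c => c + 1)) d
      = (pvLabels l objects_by_id).foldl (fun d x => d.modify x 0 (fun c => c + 1)) d := by
  intro l
  induction l with
  | nil => intro d; simp [pvLabels]
  | cons i t ih =>
    intro d
    rw [pvLabels_cons]
    simp only [List.foldl_cons]
    cases h : (PySem.Dict.mk objects_by_id).get? i with
    | none =>
      have hlab : pvLabel objects_by_id i = "" := by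
        simp only [pvLabel, PySem.Dict.getD_eq_get?_getD, h]
        decide
      rw [if_pos hlab]
      exact ih d
    | some obj =>
      have hlab : pvLabel objects_by_id i
          = PySem.Str.strip ((PySem.Dict.mk obj).getD "label" "") := by
        simp [pvLabel, PySem.Dict.getD_eq_get?_getD, h]
      by_cases he : PySem.Str.strip ((PySem.Dict.mk obj).getD "label" "") = ""
      · rw [if_pos (hlab.trans he ▸ rfl : pvLabel objects_by_id i = "")]
        simp only [he]
        exact ih d
      · have hlab' : ¬ pvLabel objects_by_id i = "" := by rw [hlab]; exact he
        rw [if_neg hlab']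
        simp only [if_neg he, List.foldl_cons, hlab]
        exact ih _

theorem pvInsertBy_congr {α : Type} (p q : α → α → Bool) (x : α) :
    ∀ (ys : List α), (∀ y ∈ ys, p x y = q x y) →
      PySem.List.insertBy p x ys = PySem.List.insertBy q x ys := by
  intro ys
  induction ys with
  | nil => intro _; rfl
  | cons y t ih =>
    intro h
    have hy := h y (by simp)
    simp only [PySem.List.insertBy, hy]
    by_cases hb : q x y = true
    · simp [hb]
    · simp only [Bool.not_eq_true] at hb
      simp only [hb, Bool.false_eq_true, if_false, List.cons.injEq, true_and]
      exact ih (fun z hz => h z (by simp [hz]))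

theorem pvFoldlInsertBy_congr {α : Type} (p q : α → α → Bool) (S : List α)
    (h : ∀ a ∈ S, ∀ b ∈ S, p a b = q a b) :
    ∀ (l acc : List α), (∀ a ∈ l, a ∈ S) → (∀ a ∈ acc, a ∈ S) →
      l.foldl (fun acc x => PySem.List.insertBy p x acc) acc
        = l.foldl (fun acc x => PySem.List.insertBy q x acc) acc := by
  intro l
  induction l with
  | nil => intro acc _ _; rfl
  | cons x t ih =>
    intro acc hl hacc
    have hx : x ∈ S := hl x (by simp)
    simp only [List.foldl_cons]
    rw [pvInsertBy_congr p q x acc (fun y hy => h x hx y (hacc y hy))]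
    exact ih _ (fun a ha => hl a (by simp [ha]))
      (fun a ha => by
        rcases (PySem.List.mem_insertBy q x a acc).1 ha with rfl | ha
        · exact hx
        · exact hacc a ha)

-- on a list whose first components determine the pair, Python's lexicographic
-- tuple sort is the sort by first component
theorem pvSorted2_eq_sorted_fst (xs : List (String × Int))
    (hx : ∀ a ∈ xs, ∀ b ∈ xs, a.1 = b.1 → a = b) :
    PySem.List.sorted2 xs (fun p => p.1) (fun p => p.2)
      = PySem.List.sorted xs (fun p => p.1) := by
  simp only [PySem.List.sorted2, PySem.List.sorted, if_neg (by decide : ¬ (false = true))]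
  apply pvFoldlInsertBy_congr _ _ xs ?_ xs [] (fun a ha => ha) (by simp)
  intro a ha b hb
  by_cases h1 : a.1 < b.1
  · simp [h1]
  · by_cases h2 : b.1 < a.1
    · simp [h1, h2]
    · have : a.1 = b.1 := le_antisymm (not_lt.1 h2) (not_lt.1 h1)
      have hab : a = b := hx a ha b hb this
      subst hab
      simp

-- every element of dropWhile (· == x) is strictly greater than x, on a sorted tail
theorem pvRestGt (x : String) :
    ∀ (xs : List String), (∀ y ∈ xs, x ≤ y) → xs.Pairwise (· ≤ ·) →
      ∀ z ∈ xs.dropWhile (fun y => y == x), x < z := by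
  intro xs
  induction xs with
  | nil => intro _ _ z hz; simp at hz
  | cons y ys ih =>
    intro hle hp z hz
    by_cases hy : y = x
    · rw [List.dropWhile_cons_of_pos (by simp [hy])] at hz
      exact ih (fun w hw => hle w (by simp [hw])) hp.of_cons z hz
    · rw [List.dropWhile_cons_of_neg (by simp [hy])] at hz
      have hxy : x < y := lt_of_le_of_ne (hle y (by simp)) (Ne.symm hy)
      rcases List.mem_cons.1 hz with rfl | hz
      · exact hxy
      · exact lt_of_lt_of_le hxy ((List.pairwise_cons.1 hp).1 z hz)

theorem pvGroupRuns_mem :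
    ∀ (l : List String), l.Pairwise (· ≤ ·) →
      ∀ p : String × Int, p ∈ pvGroupRuns l ↔ p.1 ∈ l ∧ p.2 = (l.count p.1 : Int) := by
  intro l
  induction l using pvGroupRuns.induct with
  | case1 => intro _ p; simp [pvGroupRuns]
  | case2 x xs ih =>
    intro hp p
    set run := xs.takeWhile (fun y => y == x) with hrun
    set rest := xs.dropWhile (fun y => y == x) with hrest
    have hsplit : run ++ rest = xs := List.takeWhile_append_dropWhile
    have hxle : ∀ y ∈ xs, x ≤ y := (List.pairwise_cons.1 hp).1
    have hrestgt : ∀ z ∈ rest, x < z := pvRestGt x xs hxle hp.of_cons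
    have hrunx : ∀ y ∈ run, y = x := by
      intro y hy
      have := List.mem_takeWhile_imp hy
      simpa using this
    have hrestp : rest.Pairwise (· ≤ ·) :=
      List.Pairwise.sublist (List.dropWhile_sublist _) hp.of_cons
    have hcx : (x :: xs).count x = run.length + 1 := by
      rw [List.count_cons_self, ← hsplit, List.count_append]
      have h1 : run.count x = run.length := by
        rw [List.count_eq_length]
        intro b hb; exact ((hrunx b hb).symm)
      have h2 : rest.count x = 0 := by
        rw [List.count_eq_zero]
        intro hmem; exact absurd rfl (ne_of_gt (hrestgt x hmem))
      omega
    have hck : ∀ k, k ≠ x → (x :: xs).count k = rest.count k := by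
      intro k hk
      rw [List.count_cons_of_ne (Ne.symm hk), ← hsplit, List.count_append]
      have : run.count k = 0 := by
        rw [List.count_eq_zero]
        intro hmem; exact hk (hrunx k hmem)
      omega
    rw [pvGroupRuns, List.mem_cons, ← hrun, ← hrest]
    constructor
    · rintro (rfl | hmem)
      · refine ⟨by simp, ?_⟩
        simp only [hcx]
        push_cast
        ring
      · obtain ⟨h1, h2⟩ := (ih hrestp p).1 hmem
        have hne : p.1 ≠ x := ne_of_gt (hrestgt p.1 h1)
        refine ⟨?_, ?_⟩
        · right; rw [← hsplit]; exact List.mem_append_right _ h1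
        · rw [hck p.1 hne]; exact h2
    · rintro ⟨h1, h2⟩
      by_cases hpx : p.1 = x
      · left
        have : p.2 = (1 : Int) + run.length := by
          rw [h2, hpx, hcx]; push_cast; ring
        exact Prod.ext hpx this
      · right
        have hmem : p.1 ∈ rest := by
          rcases List.mem_cons.1 h1 with h1 | h1
          · exact absurd h1 hpx
          · rw [← hsplit] at h1
            rcases List.mem_append.1 h1 with h1 | h1
            · exact absurd (hrunx _ h1) hpx
            · exact h1
        exact (ih hrestp p).2 ⟨hmem, by rw [h2, hck p.1 hpx]⟩

theorem pvGroupRuns_pairwise :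
    ∀ (l : List String), l.Pairwise (· ≤ ·) →
      (pvGroupRuns l).Pairwise (fun a b => a.1 < b.1) := by
  intro l
  induction l using pvGroupRuns.induct with
  | case1 => intro _; simp [pvGroupRuns]
  | case2 x xs ih =>
    intro hp
    have hxle : ∀ y ∈ xs, x ≤ y := (List.pairwise_cons.1 hp).1
    have hrestgt := pvRestGt x xs hxle hp.of_cons
    have hrestp : (xs.dropWhile (fun y => y == x)).Pairwise (· ≤ ·) :=
      List.Pairwise.sublist (List.dropWhile_sublist _) hp.of_cons
    rw [pvGroupRuns]
    refine List.pairwise_cons.2 ⟨?_, ih hrestp⟩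
    intro q hq
    have := ((pvGroupRuns_mem _ hrestp q).1 hq).1
    exact hrestgt q.1 this

-- ===== VERDICT (by name: the statement is the Claim_ definition above) =====
theorem count_labels_for_object_ids_py_spec : Claim_equal_count_labels_for_object_ids_py := by
  intro object_ids objects_by_id _
  unfold Spec_count_labels_for_object_ids_py
  set ls := pvLabels object_ids objects_by_id with hls
  have hA : count_labels_for_object_ids_py object_ids objects_by_id
      = PySem.List.sorted2 (PySem.Dict.counter ls).items (fun p => p.1) (fun p => p.2) := by
    unfold count_labels_for_object_ids_py
    rw [pvAfold, PySem.Dict.counter_eq_foldl]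
  have hitems : (PySem.Dict.counter ls).items
      = (PySem.Set.ofList ls).map (fun k => (k, (ls.count k : Int))) :=
    PySem.Dict.items_counter ls
  have hdet : ∀ a ∈ (PySem.Dict.counter ls).items, ∀ b ∈ (PySem.Dict.counter ls).items,
      a.1 = b.1 → a = b := by
    rw [hitems]
    intro a ha b hb hab
    obtain ⟨k, _, rfl⟩ := List.mem_map.1 ha
    obtain ⟨k', _, rfl⟩ := List.mem_map.1 hb
    simp only at hab
    subst hab
    rfl
  rw [hA, pvSorted2_eq_sorted_fst _ hdet]
  -- the sorted tail Source B groups over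
  set sl := PySem.List.sorted ls (fun s => s) with hsl
  have hslp : sl.Pairwise (· ≤ ·) := PySem.List.sorted_pairwise ls (fun s => s)
  have hperm : (pvGroupRuns sl).Perm ((PySem.Dict.counter ls).items) := by
    rw [hitems]
    refine (List.perm_ext_iff_of_nodup ?_ ?_).2 ?_
    · exact (pvGroupRuns_pairwise sl hslp).imp (by intro a b h; exact fun he => absurd (congrArg Prod.fst he) (ne_of_lt h))
    · refine List.Nodup.map ?_ (PySem.Set.nodup_ofList ls)
      intro k k' hkk'
      exact congrArg Prod.fst hkk'
    · intro p
      rw [pvGroupRuns_mem sl hslp p, List.mem_map]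
      constructor
      · rintro ⟨h1, h2⟩
        refine ⟨p.1, ?_, ?_⟩
        · exact (PySem.Set.mem_ofList _ _).2 ((PySem.List.mem_sorted _ _ _ _).1 h1)
        · have : sl.count p.1 = ls.count p.1 := (PySem.List.sorted_perm ls (fun s => s) false).count_eq p.1
          rw [this] at h2
          exact Prod.ext rfl h2.symm
      · rintro ⟨k, hk, rfl⟩
        have hkls : k ∈ ls := (PySem.Set.mem_ofList _ _).1 hk
        have hcnt : sl.count k = ls.count k := (PySem.List.sorted_perm ls (fun s => s) false).count_eq k
        exact ⟨(PySem.List.mem_sorted _ _ _ _).2 hkls, by rw [hcnt]⟩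
  rw [PySem.List.sorted_eq_of_perm_of_pairwise_lt _ _ _ hperm (pvGroupRuns_pairwise sl hslp)]
  rfl
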